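-- pv_equiv track=rewrite | github.com/s3v3nsins/codingchallanges | yahtzee.py | yahtzee_bonus2
-- ===== SOURCE A (Python) =====
-- import operator
-- import operator, time
--
-- def yahtzee_bonus2(nums):
--     dmap = dict()
--     for num in nums:
--       if num in dmap.keys():
--         dmap[num] += num
--       else:
--         dmap[num] = num
--     return max(dmap.items(), key=operator.itemgetter(1))[1]
-- ===== SOURCE B (Python) =====
-- def yahtzee_bonus2(nums):
--     # B: sort once and scan consecutive equal runs, accumulating each run's
--     # total by repeated addition and keeping the running maximum (no dict).
--     s = sorted(nums)
--     best = None
--     i, n = 0, len(s)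
--     while i < n:
--         v = s[i]
--         total = v
--         i += 1
--         while i < n and s[i] == v:
--             total += v
--             i += 1
--         if best is None or total > best:
--             best = total
--     if best is None:
--         raise ValueError("max() arg is an empty sequence")
--     return best
-- ===== Notes on version B (the rewrite author's own statement) =====
-- stated objective: alternative
-- what changed: Replaces A's dict of per-value running sums plus a final max over dict items by a sort-then-scan of consecutive equal runs that keeps only the current run total and the running maximum.
-- outside the precondition, e.g. on yahtzee_bonus2([]): A raises ValueError, B raises ValueError
import Mathlib
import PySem

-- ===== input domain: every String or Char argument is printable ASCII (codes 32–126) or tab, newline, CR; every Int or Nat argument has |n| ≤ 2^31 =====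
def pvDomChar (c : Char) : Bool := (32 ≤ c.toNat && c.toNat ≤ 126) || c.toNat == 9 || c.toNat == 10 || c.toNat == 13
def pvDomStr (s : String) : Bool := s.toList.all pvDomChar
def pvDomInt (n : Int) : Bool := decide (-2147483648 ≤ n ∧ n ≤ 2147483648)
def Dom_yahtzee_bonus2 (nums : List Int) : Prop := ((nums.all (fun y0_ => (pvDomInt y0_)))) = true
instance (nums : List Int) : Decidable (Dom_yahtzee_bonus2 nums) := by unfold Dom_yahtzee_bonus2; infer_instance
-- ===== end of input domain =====

-- B replaces A's dict of per-value running sums + max over items by a sort-then-scan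
-- of consecutive equal runs keeping a running maximum (alternative decomposition).


-- ===== PORT A =====
def yahtzee_bonus2 (nums : List Int) : Int :=
  let dmap := nums.foldl (fun d num =>
    if d.contains num then d.modify num 0 (· + num) else d.insert num num)
    (PySem.Dict.empty : PySem.Dict Int Int)
  ((PySem.List.max? dmap.items (fun p => p.2)).map (fun p => p.2)).getD 0

-- ===== PORT B =====
-- inner `while i < n and s[i] == v: total += v` loop: consume the leading run of v
def pvTakeRun (v : Int) (total : Int) : List Int → Int × List Int
  | [] => (total, [])
  | x :: xs => if x = v then pvTakeRun v (total + v) xs else (total, x :: xs)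

theorem pvTakeRun_len (v t : Int) (l : List Int) : (pvTakeRun v t l).2.length ≤ l.length := by
  induction l generalizing t with
  | nil => simp [pvTakeRun]
  | cons x xs ih =>
    simp only [pvTakeRun]
    split
    · exact le_trans (ih _) (Nat.le_succ _)
    · simp

-- outer while loop over the remaining sorted list, with the best-so-far accumulator
def pvRunMax : List Int → Option Int → Option Int
  | [], best => best
  | v :: rest, best =>
    let tr := pvTakeRun v v rest
    pvRunMax tr.2 (some (match best with
      | none => tr.1
      | some b => if tr.1 > b then tr.1 else b))
termination_by l _ => l.length
decreasing_by exact Nat.lt_succ_of_le (pvTakeRun_len _ _ _)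

def yahtzee_bonus2_alt (nums : List Int) : Int :=
  (pvRunMax (PySem.List.sorted nums (fun x => x) false) none).getD 0

-- ===== PRECONDITION & SPEC =====
-- on [] both Pythons raise ValueError (max over an empty collection)
def Pre_yahtzee_bonus2 (nums : List Int) : Prop := nums ≠ []
instance (nums : List Int) : Decidable (Pre_yahtzee_bonus2 nums) := by unfold Pre_yahtzee_bonus2; infer_instance
def pvWitness_yahtzee_bonus2 : List Int := [2, 3, 2]

def Spec_yahtzee_bonus2 (nums : List Int) (out : Int) : Prop := out = yahtzee_bonus2_alt nums
instance (nums : List Int) (out : Int) : Decidable (Spec_yahtzee_bonus2 nums out) := by unfold Spec_yahtzee_bonus2; infer_instance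

-- ===== CLAIM (what is proved, stated in full; the proofs are below) =====
def Claim_equal_yahtzee_bonus2 : Prop := ∀ (nums : List Int), Dom_yahtzee_bonus2 nums → Pre_yahtzee_bonus2 nums → Spec_yahtzee_bonus2 nums (yahtzee_bonus2 nums)


-- ===== LEMMAS AND PROOFS =====

-- both results are THE element r with: r is some value's total, and every value's total is ≤ r
def pvGood (nums : List Int) (r : Int) : Prop :=
  (∃ v ∈ nums, r = v * (nums.count v : Int)) ∧ ∀ v ∈ nums, v * (nums.count v : Int) ≤ r

theorem pvGood_unique {nums : List Int} {r r' : Int} (h : pvGood nums r) (h' : pvGood nums r') : r = r' := by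
  obtain ⟨⟨v, hv, rfl⟩, hub⟩ := h
  obtain ⟨⟨w, hw, rfl⟩, hub'⟩ := h'
  exact le_antisymm (hub' v hv) (hub w hw)

theorem pvCountConsSelf (a : Int) (l : List Int) : (a :: l).count a = l.count a + 1 := by
  simp

theorem pvCountConsNe (a b : Int) (h : ¬a = b) (l : List Int) : (a :: l).count b = l.count b := by
  simp [h]

-- A's loop body is exactly a modify
theorem pvStep_eq (d : PySem.Dict Int Int) (x : Int) :
    (if d.contains x then d.modify x 0 (· + x) else d.insert x x) = d.modify x 0 (· + x) := by
  unfold PySem.Dict.modify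
  split
  · rfl
  · next hc =>
    have h0 : d.getD x 0 = 0 := PySem.Dict.getD_of_not_contains d 0 (by simpa using hc)
    simp [h0]

theorem pvLoop_getD (l : List Int) (d : PySem.Dict Int Int) (v : Int) :
    (l.foldl (fun d x => d.modify x 0 (· + x)) d).getD v 0
      = d.getD v 0 + v * (l.count v : Int) := by
  induction l generalizing d with
  | nil => simp
  | cons x xs ih =>
    simp only [List.foldl_cons, ih, PySem.Dict.getD_modify]
    by_cases hvx : v = x
    · subst hvx; rw [if_pos rfl, pvCountConsSelf]; push_cast; ring
    · rw [if_neg hvx, pvCountConsNe x v (fun hh => hvx hh.symm)]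

theorem pvA_good (nums : List Int) (h : nums ≠ []) : pvGood nums (yahtzee_bonus2 nums) := by
  have hstep : (fun (d : PySem.Dict Int Int) (num : Int) =>
      if d.contains num then d.modify num 0 (· + num) else d.insert num num)
      = fun d num => d.modify num 0 (· + num) :=
    funext fun d => funext fun x => pvStep_eq d x
  simp only [yahtzee_bonus2, hstep]
  set dmap := nums.foldl (fun d x => d.modify x 0 (· + x)) (PySem.Dict.empty : PySem.Dict Int Int) with hd
  have hkeys : dmap.keys = PySem.Set.ofList nums := by
    rw [hd, PySem.Dict.keys_foldl_modify]
    simp [PySem.Set.update_nil_left]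
  have hmemkeys : ∀ v : Int, v ∈ dmap.keys ↔ v ∈ nums := by
    intro v; rw [hkeys, PySem.Set.mem_ofList]
  have hnd : dmap.keys.Nodup := hkeys ▸ PySem.Set.nodup_ofList nums
  have hgdval : ∀ v : Int, dmap.getD v 0 = v * (nums.count v : Int) := by
    intro v; rw [hd, pvLoop_getD]; simp [PySem.Dict.getD_empty]
  obtain ⟨x0, rest0, hx0⟩ := List.exists_cons_of_ne_nil h
  have hitems : dmap.items ≠ [] := by
    intro he
    have hke : dmap.keys = [] := by simp [PySem.Dict.keys, he]
    have hx : x0 ∈ dmap.keys := (hmemkeys x0).2 (by simp [hx0])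
    simp [hke] at hx
  obtain ⟨m, hm⟩ : ∃ m, PySem.List.max? dmap.items (fun p => p.2) = some m := by
    cases hq : PySem.List.max? dmap.items (fun p => p.2) with
    | none => exact absurd ((PySem.List.max?_eq_none_iff _ _).1 hq) hitems
    | some m => exact ⟨m, rfl⟩
  rw [hm]
  simp only [Option.map_some, Option.getD_some]
  have hmmem : m ∈ dmap.items := PySem.List.max?_mem hm
  have hget : dmap.get? m.1 = some m.2 :=
    PySem.Dict.get?_of_mem_items dmap (by simpa using hmmem) hnd
  have hval : m.2 = m.1 * (nums.count m.1 : Int) := by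
    have hgd : dmap.getD m.1 0 = m.2 := by
      rw [PySem.Dict.getD_eq_get?_getD, hget]; rfl
    rw [← hgd, hgdval]
  constructor
  · exact ⟨m.1, (hmemkeys m.1).1 (PySem.Dict.mem_keys_of_mem_items dmap (by simpa using hmmem)), hval⟩
  · intro v hv
    have hvk : v ∈ dmap.keys := (hmemkeys v).2 hv
    obtain ⟨w, hw⟩ : ∃ w, dmap.get? v = some w := by
      cases hq : dmap.get? v with
      | none => exact absurd ((PySem.Dict.get?_eq_none_iff_not_mem_keys _ _).1 hq) (by simp [hvk])
      | some w => exact ⟨w, rfl⟩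
    have hwv : w = v * (nums.count v : Int) := by
      have hgd : dmap.getD v 0 = w := by rw [PySem.Dict.getD_eq_get?_getD, hw]; rfl
      rw [← hgd, hgdval]
    have hmemvw : (v, w) ∈ dmap.items := PySem.Dict.mem_items_of_get?_eq_some dmap hw
    have hle := PySem.List.max?_isMax hm (v, w) hmemvw
    simpa [hwv] using hle

-- takeRun on a sorted tail: the run total and the leftover's counts
theorem pvTakeRun_spec (v : Int) (rest : List Int)
    (hp : (v :: rest).Pairwise (· ≤ ·)) (t : Int) :
    (pvTakeRun v t rest).1 = t + v * (rest.count v : Int) ∧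
    (pvTakeRun v t rest).2.Pairwise (· ≤ ·) ∧
    (∀ x : Int, (pvTakeRun v t rest).2.count x = if x = v then 0 else rest.count x) ∧
    (∀ x ∈ (pvTakeRun v t rest).2, x ∈ rest) := by
  induction rest generalizing t with
  | nil =>
    refine ⟨by simp [pvTakeRun], by simp [pvTakeRun], ?_, by simp [pvTakeRun]⟩
    intro x; simp [pvTakeRun]
  | cons x xs ih =>
    rw [List.pairwise_cons] at hp
    by_cases hxv : x = v
    · subst hxv
      have hp' : (x :: xs).Pairwise (· ≤ ·) := hp.2
      obtain ⟨h1, h2, h3, h4⟩ := ih (by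
        rw [List.pairwise_cons] at hp' ⊢
        exact ⟨hp'.1, hp'.2⟩) (t + x)
      have hstep : pvTakeRun x t (x :: xs) = pvTakeRun x (t + x) xs := by
        simp [pvTakeRun]
      refine ⟨?_, by rw [hstep]; exact h2, ?_, ?_⟩
      · rw [hstep, h1, pvCountConsSelf]; push_cast; ring
      · intro y
        rw [hstep, h3 y]
        by_cases hyx : y = x
        · simp [hyx]
        · rw [if_neg hyx, if_neg hyx, pvCountConsNe x y (fun hh => hyx hh.symm)]
      · intro y hy
        rw [hstep] at hy
        exact List.mem_cons_of_mem _ (h4 y hy)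
    · have hstep : pvTakeRun v t (x :: xs) = (t, x :: xs) := by
        simp [pvTakeRun, hxv]
      have hvx : v < x := lt_of_le_of_ne (hp.1 x (by simp)) (Ne.symm hxv)
      have hnov : ∀ y ∈ x :: xs, y ≠ v := by
        intro y hy hyv
        rcases List.mem_cons.1 hy with rfl | hy'
        · exact hxv hyv
        · have hxley : x ≤ y := (List.pairwise_cons.1 hp.2).1 y hy'
          omega
      have hcount0 : (x :: xs).count v = 0 :=
        List.count_eq_zero.2 (fun hmem => hnov v hmem rfl)
      refine ⟨by rw [hstep, hcount0]; push_cast; ring, by rw [hstep]; exact hp.2, ?_, by rw [hstep]; exact fun y hy => hy⟩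
      intro y
      rw [hstep]
      by_cases hyv : y = v
      · simp [hyv, hcount0]
      · simp [hyv]

theorem pvRunMax_some : ∀ (n : Nat) (s : List Int), s.length ≤ n → s.Pairwise (· ≤ ·) → ∀ b : Int,
    ∃ r, pvRunMax s (some b) = some r ∧ b ≤ r ∧
      (r = b ∨ ∃ v ∈ s, r = v * (s.count v : Int)) ∧
      (∀ v ∈ s, v * (s.count v : Int) ≤ r) := by
  intro n
  induction n with
  | zero =>
    intro s hlen _ b
    have : s = [] := List.eq_nil_of_length_eq_zero (Nat.le_zero.1 hlen)
    subst this
    exact ⟨b, by simp [pvRunMax], le_refl b, Or.inl rfl, by simp⟩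
  | succ n ih =>
    intro s hlen hs b
    cases s with
    | nil => exact ⟨b, by simp [pvRunMax], le_refl b, Or.inl rfl, by simp⟩
    | cons v rest =>
      obtain ⟨h1, h2, h3, h4⟩ := pvTakeRun_spec v rest hs v
      have hlen2 : (pvTakeRun v v rest).2.length ≤ n := by
        have := pvTakeRun_len v v rest
        simp only [List.length_cons] at hlen
        omega
      have htr1 : (pvTakeRun v v rest).1 = v * (((v :: rest).count v : Nat) : Int) := by
        rw [h1, pvCountConsSelf]; push_cast; ring
      obtain ⟨r, hr, hbr, hcases, hub⟩ := ih (pvTakeRun v v rest).2 hlen2 h2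
        (if (pvTakeRun v v rest).1 > b then (pvTakeRun v v rest).1 else b)
      have hble : b ≤ (if (pvTakeRun v v rest).1 > b then (pvTakeRun v v rest).1 else b) := by
        split <;> omega
      have htle : (pvTakeRun v v rest).1 ≤ (if (pvTakeRun v v rest).1 > b then (pvTakeRun v v rest).1 else b) := by
        split <;> omega
      have hcnt : ∀ w ∈ (pvTakeRun v v rest).2, w ≠ v ∧ (pvTakeRun v v rest).2.count w = (v :: rest).count w := by
        intro w hw
        have hwne : w ≠ v := by
          intro hwv
          have hpos := List.count_pos_iff.2 hw
          rw [h3 w, if_pos hwv] at hpos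
          omega
        refine ⟨hwne, ?_⟩
        rw [h3 w, if_neg hwne, pvCountConsNe v w (fun hh => hwne hh.symm)]
      refine ⟨r, ?_, le_trans hble hbr, ?_, ?_⟩
      · rw [← hr]
        simp only [pvRunMax]
      · rcases hcases with rfl | ⟨w, hw, rfl⟩
        · by_cases hgt : (pvTakeRun v v rest).1 > b
          · exact Or.inr ⟨v, by simp, by rw [if_pos hgt, htr1]⟩
          · exact Or.inl (by rw [if_neg hgt])
        · obtain ⟨hwne, hwc⟩ := hcnt w hw
          exact Or.inr ⟨w, List.mem_cons_of_mem _ (h4 w hw), by rw [hwc]⟩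
      · intro u hu
        by_cases huv : u = v
        · subst huv
          calc u * (((u :: rest).count u : Nat) : Int) = (pvTakeRun u u rest).1 := htr1.symm
            _ ≤ _ := le_trans htle hbr
        · have hcu : ((v :: rest).count u) = rest.count u :=
            pvCountConsNe v u (fun hh => huv hh.symm) rest
          have humem : u ∈ rest := by
            rcases List.mem_cons.1 hu with rfl | h'
            · exact absurd rfl huv
            · exact h'
          have hucnt : (pvTakeRun v v rest).2.count u = rest.count u := by
            rw [h3 u, if_neg huv]
          have hupos : 0 < rest.count u := List.count_pos_iff.2 humem
          have humem2 : u ∈ (pvTakeRun v v rest).2 := by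
            rw [← List.count_pos_iff, hucnt]; exact hupos
          have := hub u humem2
          rw [hucnt] at this
          rw [hcu]
          exact this

theorem pvB_good (nums : List Int) (h : nums ≠ []) : pvGood nums (yahtzee_bonus2_alt nums) := by
  unfold yahtzee_bonus2_alt
  set s := PySem.List.sorted nums (fun x => x) false with hsdef
  have hperm : s.Perm nums := PySem.List.sorted_perm nums (fun x => x) false
  have hsp : s.Pairwise (· ≤ ·) := PySem.List.sorted_pairwise nums (fun x => x)
  have hne : s ≠ [] := by
    rw [hsdef]
    simp [PySem.List.sorted_eq_nil_iff, h]
  obtain ⟨v, rest, hcons⟩ := List.exists_cons_of_ne_nil hne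
  rw [hcons] at hsp
  obtain ⟨h1, h2, h3, h4⟩ := pvTakeRun_spec v rest hsp v
  have htr1 : (pvTakeRun v v rest).1 = v * (((v :: rest).count v : Nat) : Int) := by
    rw [h1, pvCountConsSelf]; push_cast; ring
  obtain ⟨r, hr, hbr, hcases, hub⟩ :=
    pvRunMax_some (pvTakeRun v v rest).2.length (pvTakeRun v v rest).2 (le_refl _) h2
      (pvTakeRun v v rest).1
  have hcnt : ∀ w ∈ (pvTakeRun v v rest).2, w ≠ v ∧ (pvTakeRun v v rest).2.count w = (v :: rest).count w := by
    intro w hw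
    have hwne : w ≠ v := by
      intro hwv
      have hpos := List.count_pos_iff.2 hw
      rw [h3 w, if_pos hwv] at hpos
      omega
    refine ⟨hwne, ?_⟩
    rw [h3 w, if_neg hwne, pvCountConsNe v w (fun hh => hwne hh.symm)]
  have hgood : pvGood (v :: rest) r := by
    constructor
    · rcases hcases with rfl | ⟨w, hw, rfl⟩
      · exact ⟨v, by simp, htr1⟩
      · obtain ⟨hwne, hwc⟩ := hcnt w hw
        exact ⟨w, List.mem_cons_of_mem _ (h4 w hw), by rw [hwc]⟩
    · intro u hu
      by_cases huv : u = v
      · subst huv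
        calc u * (((u :: rest).count u : Nat) : Int) = (pvTakeRun u u rest).1 := htr1.symm
          _ ≤ r := hbr
      · have hcu : ((v :: rest).count u) = rest.count u :=
          pvCountConsNe v u (fun hh => huv hh.symm) rest
        have humem : u ∈ rest := by
          rcases List.mem_cons.1 hu with rfl | h'
          · exact absurd rfl huv
          · exact h'
        have hucnt : (pvTakeRun v v rest).2.count u = rest.count u := by
          rw [h3 u, if_neg huv]
        have humem2 : u ∈ (pvTakeRun v v rest).2 := by
          rw [← List.count_pos_iff, hucnt]
          exact List.count_pos_iff.2 humem
        have := hub u humem2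
        rw [hucnt] at this
        rw [hcu]
        exact this
  have hout : pvRunMax s none = some r := by
    rw [hcons]
    simp only [pvRunMax]
    exact hr
  rw [hout]
  simp only [Option.getD_some]
  rw [hcons] at hperm
  constructor
  · obtain ⟨w, hw, hwv⟩ := hgood.1
    exact ⟨w, hperm.mem_iff.1 hw, by rw [← hperm.count_eq]; exact hwv⟩
  · intro u hu
    have := hgood.2 u (hperm.mem_iff.2 hu)
    rw [hperm.count_eq] at this
    exact this

-- ===== VERDICT (by name: the statement is the Claim_ definition above) =====
theorem yahtzee_bonus2_spec : Claim_equal_yahtzee_bonus2 := by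
  intro nums _ hpre
  unfold Spec_yahtzee_bonus2
  exact pvGood_unique (pvA_good nums hpre) (pvB_good nums hpre)
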